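-- pv_equiv track=rewrite | github.com/JingyZhu/FidEx | fidelity_check/check_meaningful.py | _remove_wrapping_elements
-- ===== SOURCE A (Python) =====
-- def _remove_wrapping_elements(branch, xpaths_map):
--     removed = 1 # dummy first
--     cur_branch = branch
--     while removed > 0:
--         removed = 0
--         new_branch = []
--         for br in cur_branch:
--             has_child = False
--             has_xpathmap_child = False
--             for b in cur_branch:
--                 if b != br and b.startswith(br):
--                     has_child = True
--                     break
--             if has_child:
--                 new_branch.append(br)
--                 continue
--             # Check if xpaths_map has any br's children
--             # If so, this mean the br is just a wrapping element, where all the children are matched or ignored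
--             for b in xpaths_map:
--                 if b != br and b.startswith(br):
--                     has_xpathmap_child = True
--                     removed += 1
--                     break
--             if not has_xpathmap_child:
--                 new_branch.append(br)
--         cur_branch = new_branch
--     return cur_branch
-- ===== SOURCE B (Python) =====
-- def _remove_wrapping_elements(branch, xpaths_map):
--     # Single DP pass in decreasing-length order instead of A's repeated fixpoint sweeps.
--     keys = list(xpaths_map)
--     rem = {}
--     for br in sorted(branch, key=len, reverse=True):
--         rem[br] = (any(b != br and b.startswith(br) for b in keys)
--                    and all(rem[b] for b in branch if b != br and b.startswith(br)))
--     return [br for br in branch if not rem[br]]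
-- ===== Notes on version B (the rewrite author's own statement) =====
-- stated objective: faster
-- what changed: A repeatedly re-sweeps the whole list until a fixpoint, rechecking both child conditions each pass; B computes each element's 'removable' status once by dynamic programming over the elements in decreasing length order (a proper prefix-extension is strictly longer, so its status is already known), then filters the original list in one pass.
import Mathlib
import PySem

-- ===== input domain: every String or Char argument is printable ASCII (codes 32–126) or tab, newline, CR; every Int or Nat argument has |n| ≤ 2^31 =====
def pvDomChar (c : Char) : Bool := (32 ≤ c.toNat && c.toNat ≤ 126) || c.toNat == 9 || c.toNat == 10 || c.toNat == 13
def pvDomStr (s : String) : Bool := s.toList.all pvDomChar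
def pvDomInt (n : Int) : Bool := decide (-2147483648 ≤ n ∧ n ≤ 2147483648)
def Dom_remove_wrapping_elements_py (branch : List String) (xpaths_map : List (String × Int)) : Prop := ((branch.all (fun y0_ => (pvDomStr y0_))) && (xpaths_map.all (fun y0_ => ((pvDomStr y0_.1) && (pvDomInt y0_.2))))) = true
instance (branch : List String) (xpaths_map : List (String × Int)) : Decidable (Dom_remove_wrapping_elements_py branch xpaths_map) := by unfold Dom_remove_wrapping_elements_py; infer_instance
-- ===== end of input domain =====

-- B replaces A's repeated whole-list fixpoint sweeps by one dynamic-programming pass over the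
-- elements in decreasing length order (measured faster on large inputs; return value identical).

-- 'b != br and b.startswith(br)' — shared transliteration of the test both Pythons use verbatim
def pvExt (b br : String) : Bool := (!(b == br)) && PySem.Str.startswith b br

-- ===== PORT A =====
-- one iteration of the 'for br in cur_branch' body: state = (new_branch, removed)
def pvPassStep (cur keys : List String) (st : List String × Nat) (br : String) : List String × Nat :=
  if cur.any (fun b => pvExt b br) then (st.1 ++ [br], st.2)          -- has_child: keep
  else if keys.any (fun b => pvExt b br) then (st.1, st.2 + 1)        -- has_xpathmap_child: drop, removed += 1
  else (st.1 ++ [br], st.2)                                           -- keep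

-- one full pass of the while-body
def pvPassA (cur keys : List String) : List String × Nat :=
  cur.foldl (pvPassStep cur keys) ([], 0)

-- every element is either appended or counted as removed
theorem pvPassStep_len (cur keys : List String) :
    ∀ (l : List String) (acc : List String) (r : Nat),
      (l.foldl (pvPassStep cur keys) (acc, r)).1.length + (l.foldl (pvPassStep cur keys) (acc, r)).2
        = acc.length + r + l.length := by
  intro l
  induction l with
  | nil => intro acc r; simp
  | cons br t ih =>
    intro acc r
    simp only [List.foldl_cons, pvPassStep]
    split_ifs <;> simp [ih] <;> omega

theorem pvPassA_len (cur keys : List String) :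
    (pvPassA cur keys).1.length + (pvPassA cur keys).2 = cur.length := by
  have h := pvPassStep_len cur keys cur [] 0
  simpa [pvPassA] using h

-- 'while removed > 0' loop (removed = 1 dummy ⇒ the first pass always runs)
def pvLoopA (keys : List String) (cur : List String) : List String :=
  match hp : pvPassA cur keys with
  | (nb, r) => if r = 0 then nb else pvLoopA keys nb
termination_by cur.length
decreasing_by
  have h := pvPassA_len cur keys
  rw [hp] at h
  simp at h
  omega

def remove_wrapping_elements_py (branch : List String) (xpaths_map : List (String × Int)) : List String :=
  pvLoopA (xpaths_map.map Prod.fst) branch      -- 'for b in xpaths_map' iterates the dict's keys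

-- ===== PORT B =====
-- 'any(b != br and b.startswith(br) for b in keys)'
def pvFlag (keys : List String) (br : String) : Bool := keys.any (fun b => pvExt b br)

-- rem[br] = flag(br) and all(rem[b] for b in branch if b != br and b.startswith(br)),
-- filled in decreasing-length order (Python's sorted(branch, key=len, reverse=True)).
-- rem[b] never raises KeyError (every proper prefix-extension is strictly longer, hence already
-- processed), so the getD default is never consulted.
def remove_wrapping_elements_py_alt (branch : List String) (xpaths_map : List (String × Int)) : List String :=
  let keys := xpaths_map.map Prod.fst
  let rem : PySem.Dict String Bool :=
    (PySem.List.sorted branch (fun s => PySem.Str.len s) true).foldl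
      (fun d br =>
        d.insert br (pvFlag keys br &&
          (branch.filter (fun b => pvExt b br)).all (fun b => d.getD b true)))
      PySem.Dict.empty
  branch.filter (fun br => !(rem.getD br true))

-- ===== PRECONDITION & SPEC =====
def Spec_remove_wrapping_elements_py (branch : List String) (xpaths_map : List (String × Int)) (out : List String) : Prop := out = remove_wrapping_elements_py_alt branch xpaths_map
instance (branch : List String) (xpaths_map : List (String × Int)) (out : List String) : Decidable (Spec_remove_wrapping_elements_py branch xpaths_map out) := by unfold Spec_remove_wrapping_elements_py; infer_instance

-- ===== CLAIM (what is proved, stated in full; the proofs are below) =====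
def Claim_equal_remove_wrapping_elements_py : Prop := ∀ (branch : List String) (xpaths_map : List (String × Int)), Dom_remove_wrapping_elements_py branch xpaths_map → Spec_remove_wrapping_elements_py branch xpaths_map (remove_wrapping_elements_py branch xpaths_map)

-- ===== LEMMAS AND PROOFS =====

-- pvExt b br means br is a strictly shorter prefix of b
theorem pvExt_lt {b br : String} (h : pvExt b br = true) : br.toList.length < b.toList.length := by
  simp only [pvExt, Bool.and_eq_true, Bool.not_eq_true', beq_eq_false_iff_ne] at h
  obtain ⟨hne, hpre⟩ := h
  rw [PySem.Str.startswith_eq] at hpre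
  have hp : br.toList <+: b.toList := (PySem.Chars.startswith_iff _ _).mp hpre
  rcases lt_or_eq_of_le hp.length_le with hlt | heq
  · exact hlt
  · exact absurd (String.ext (hp.eq_of_length heq)).symm hne

-- an upper bound for the lengths of the members of a list
def pvMaxLen (l : List String) : Nat := l.foldr (fun s m => max s.toList.length m) 0

theorem pvMaxLen_le {l : List String} {b : String} (h : b ∈ l) : b.toList.length ≤ pvMaxLen l := by
  induction l with
  | nil => cases h
  | cons x t ih =>
    rcases List.mem_cons.mp h with h | h
    · subst h; simp [pvMaxLen]
    · simp only [pvMaxLen, List.foldr_cons]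
      exact le_trans (ih h) (le_max_right _ _)

-- the semantic 'removable' predicate: br is (eventually) removed iff it has an xpaths_map child
-- and every branch child of it is itself removable (well-founded: children are strictly longer)
def pvRem (branch keys : List String) (br : String) : Bool :=
  pvFlag keys br &&
    branch.attach.all (fun x =>
      if h : pvExt x.1 br = true then pvRem branch keys x.1 else true)
termination_by pvMaxLen branch + 1 - br.toList.length
decreasing_by
  have h1 := pvExt_lt h
  have h2 := pvMaxLen_le x.2
  omega

theorem pvRem_true_iff (branch keys : List String) (br : String) :
    pvRem branch keys br = true ↔
      pvFlag keys br = true ∧ ∀ b ∈ branch, pvExt b br = true → pvRem branch keys b = true := by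
  rw [pvRem]
  simp only [Bool.and_eq_true, List.all_eq_true, List.mem_attach, true_implies]
  constructor
  · rintro ⟨hf, hall⟩
    refine ⟨hf, fun b hb hext => ?_⟩
    have := hall ⟨b, hb⟩
    simpa [hext] using this
  · rintro ⟨hf, hall⟩
    refine ⟨hf, fun x => ?_⟩
    by_cases h : pvExt x.1 br = true
    · simpa [h] using hall x.1 x.2 h
    · simp [h]

-- ---------- B computes filter (¬ pvRem) ----------

theorem pvAll_congr {α : Type} {l : List α} {p q : α → Bool} (h : ∀ x ∈ l, p x = q x) :
    l.all p = l.all q := by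
  induction l with
  | nil => rfl
  | cons a t ih => simp [List.all_cons, h a (by simp), ih (fun x hx => h x (by simp [hx]))]

theorem pvFoldB_inv (branch keys : List String) :
    ∀ (rest pre : List String) (d : PySem.Dict String Bool),
      (∀ b ∈ branch, b ∈ pre ++ rest) →
      (pre ++ rest).Pairwise (fun a b => b.toList.length ≤ a.toList.length) →
      (∀ x, d.get? x = if x ∈ pre then some (pvRem branch keys x) else none) →
      ∀ x, ((rest.foldl
              (fun d br =>
                d.insert br (pvFlag keys br &&
                  (branch.filter (fun b => pvExt b br)).all (fun b => d.getD b true)))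
              d).get? x)
            = if x ∈ pre ++ rest then some (pvRem branch keys x) else none := by
  intro rest
  induction rest with
  | nil => intro pre d _ _ hd x; simpa using hd x
  | cons br rest' ih =>
    intro pre d hmem hpw hd x
    -- the value inserted for br is exactly pvRem branch keys br
    have hgetD : ∀ b ∈ branch, pvExt b br = true → d.getD b true = pvRem branch keys b := by
      intro b hb hext
      have hbmem := hmem b hb
      have hbpre : b ∈ pre := by
        rcases List.mem_append.mp hbmem with h | h
        · exact h
        · exfalso
          have hlt := pvExt_lt hext
          rcases List.mem_cons.mp h with h | h
          · subst h
            simp [pvExt] at hext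
          · have hpw2 := (List.pairwise_append.mp hpw).2.1
            have := (List.pairwise_cons.mp hpw2).1 b h
            omega
      rw [PySem.Dict.getD_eq_get?_getD, hd b]
      simp [hbpre]
    have hval : (pvFlag keys br &&
        (branch.filter (fun b => pvExt b br)).all (fun b => d.getD b true))
        = pvRem branch keys br := by
      have hall : ((branch.filter (fun b => pvExt b br)).all (fun b => d.getD b true))
          = ((branch.filter (fun b => pvExt b br)).all (fun b => pvRem branch keys b)) := by
        apply pvAll_congr
        intro b hb
        exact hgetD b (List.mem_filter.mp hb).1 (of_decide_eq_true (by
          have := (List.mem_filter.mp hb).2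
          simpa using this))
      rw [hall]
      apply Bool.coe_iff_coe.mp
      rw [pvRem_true_iff]
      simp only [Bool.and_eq_true, List.all_eq_true, List.mem_filter]
      constructor
      · rintro ⟨hf, h⟩
        exact ⟨hf, fun b hb hext => h b ⟨hb, by simp [hext]⟩⟩
      · rintro ⟨hf, h⟩
        exact ⟨hf, fun b hb => h b hb.1 (by simpa using hb.2)⟩
    simp only [List.foldl_cons, hval]
    have hnext := ih (pre ++ [br]) (d.insert br (pvRem branch keys br))
      (by intro b hb; rw [← List.append_cons]; exact hmem b hb)
      (by rw [← List.append_cons]; exact hpw)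
      (by
        intro y
        rw [PySem.Dict.get?_insert]
        by_cases hy : y = br
        · simp [hy]
        · simp [hy, hd y])
      x
    rw [hnext, ← List.append_cons]

theorem pvB_eq_filter (branch : List String) (xpaths_map : List (String × Int)) :
    remove_wrapping_elements_py_alt branch xpaths_map
      = branch.filter (fun br => !(pvRem branch (xpaths_map.map Prod.fst) br)) := by
  simp only [remove_wrapping_elements_py_alt]
  have hinv := pvFoldB_inv branch (xpaths_map.map Prod.fst)
    (PySem.List.sorted branch (fun s => PySem.Str.len s) true) [] PySem.Dict.empty
    (by intro b hb; simpa using (PySem.List.mem_sorted branch (fun s => PySem.Str.len s) true b).mpr hb)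
    (by
      simp only [List.nil_append]
      have hpw := PySem.List.sorted_pairwise_rev branch (fun s => PySem.Str.len s)
      refine hpw.imp ?_
      intro a b h
      simp only [PySem.Str.len_eq] at h
      exact_mod_cast h)
    (by intro x; simp [PySem.Dict.get?_empty])
  apply List.filter_congr
  intro br hbr
  rw [PySem.Dict.getD_eq_get?_getD, hinv br]
  simp [hbr]

-- ---------- A computes filter (¬ pvRem) ----------

-- the keep-condition of one pass
def pvKeep (cur keys : List String) (br : String) : Bool :=
  cur.any (fun b => pvExt b br) || !(keys.any (fun b => pvExt b br))

theorem pvPass_spec (cur keys : List String) :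
    ∀ (l : List String) (acc : List String) (r : Nat),
      (l.foldl (pvPassStep cur keys) (acc, r))
        = (acc ++ l.filter (pvKeep cur keys), r + l.countP (fun br => !(pvKeep cur keys br))) := by
  intro l
  induction l with
  | nil => intro acc r; simp
  | cons br t ih =>
    intro acc r
    simp only [List.foldl_cons, pvPassStep, pvKeep]
    split_ifs with h1 h2
    · simp [ih, pvKeep, h1]
    · simp [ih, pvKeep, h1, h2]; omega
    · simp [ih, pvKeep, h1, h2]

-- the loop invariant: cur is a value-filter of branch and only removable values were dropped
def pvInv (branch keys : List String) (p : String → Bool) (cur : List String) : Prop :=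
  cur = branch.filter p ∧ ∀ x ∈ branch, p x = false → pvRem branch keys x = true

-- a nonempty list of strings has a member of maximal length
theorem pvExists_max : ∀ (l : List String), l ≠ [] → ∃ m ∈ l, ∀ y ∈ l, y.toList.length ≤ m.toList.length := by
  intro l
  induction l with
  | nil => intro h; exact absurd rfl h
  | cons a t ih =>
    intro _
    rcases eq_or_ne t [] with ht | ht
    · subst ht; exact ⟨a, by simp, by simp⟩
    · obtain ⟨m, hm, hmax⟩ := ih ht
      by_cases h : a.toList.length ≤ m.toList.length
      · refine ⟨m, by simp [hm], ?_⟩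
        intro y hy
        rcases List.mem_cons.mp hy with hy | hy
        · subst hy; exact h
        · exact hmax y hy
      · refine ⟨a, by simp, ?_⟩
        intro y hy
        rcases List.mem_cons.mp hy with hy | hy
        · subst hy; exact le_refl _
        · have := hmax y hy; omega

-- a pass that removes nothing only runs on a list with no removable element
theorem pvNoRem_of_fix (branch keys : List String) (p : String → Bool) (cur : List String)
    (hcur : cur = branch.filter p)
    (hall : ∀ x ∈ cur, pvKeep cur keys x = true) :
    ∀ x ∈ cur, pvRem branch keys x = false := by
  intro x hx
  by_contra hxr0
  have hxr : pvRem branch keys x = true := by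
    cases h : pvRem branch keys x
    · exact absurd h hxr0
    · rfl
  -- take a removable member of cur of maximal length
  have hSne : cur.filter (fun y => pvRem branch keys y) ≠ [] := by
    intro h
    have := List.filter_eq_nil_iff.mp h x hx
    simp [hxr] at this
  obtain ⟨m, hmS, hmax⟩ := pvExists_max _ hSne
  have hmcur : m ∈ cur := (List.mem_filter.mp hmS).1
  have hmrem : pvRem branch keys m = true := by simpa using (List.mem_filter.mp hmS).2
  obtain ⟨hflag, hch⟩ := (pvRem_true_iff branch keys m).mp hmrem
  have hkeep := hall m hmcur
  simp only [pvKeep, pvFlag] at hkeep hflag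
  rw [Bool.or_eq_true] at hkeep
  rcases hkeep with hkeep | hkeep
  · -- m has a child in cur: that child is removable and strictly longer — contradicts maximality
    obtain ⟨b, hb, hext⟩ := List.any_eq_true.mp hkeep
    have hbbr : b ∈ branch := by
      rw [hcur] at hb
      exact (List.mem_filter.mp hb).1
    have hbrem := hch b hbbr hext
    have hbS : b ∈ cur.filter (fun y => pvRem branch keys y) := List.mem_filter.mpr ⟨hb, by simp [hbrem]⟩
    have := hmax b hbS
    have := pvExt_lt hext
    omega
  · simp [hflag] at hkeep

theorem pvLoopA_eq (branch keys : List String) :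
    ∀ (n : Nat) (cur : List String) (p : String → Bool), cur.length ≤ n →
      pvInv branch keys p cur →
      pvLoopA keys cur = branch.filter (fun x => !(pvRem branch keys x)) := by
  intro n
  induction n with
  | zero =>
    intro cur p hlen hinv
    obtain ⟨hcur, hp⟩ := hinv
    have hnil : cur = [] := List.eq_nil_of_length_eq_zero (Nat.le_zero.mp hlen)
    subst hnil
    rw [pvLoopA]
    have hnilpass : pvPassA ([] : List String) keys = ([], 0) := rfl
    rw [hnilpass]
    simp only
    rw [if_pos trivial]
    symm
    rw [List.filter_eq_nil_iff]
    intro x hx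
    have hpx := List.filter_eq_nil_iff.mp hcur.symm x hx
    simp only [Bool.not_eq_true] at hpx
    simp [hp x hx hpx]
  | succ n ih =>
    intro cur p hlen hinv
    obtain ⟨hcur, hp⟩ := hinv
    have hpass : pvPassA cur keys
        = (cur.filter (pvKeep cur keys), cur.countP (fun br => !(pvKeep cur keys br))) := by
      simpa using pvPass_spec cur keys cur [] 0
    rw [pvLoopA, hpass]
    simp only
    by_cases hc : cur.countP (fun br => !(pvKeep cur keys br)) = 0
    · rw [if_pos hc]
      have hall : ∀ x ∈ cur, pvKeep cur keys x = true := by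
        intro x hx
        have := List.countP_eq_zero.mp hc x hx
        simpa using this
      rw [List.filter_eq_self.mpr hall, hcur]
      apply List.filter_congr
      intro x hx
      cases hpx : p x
      · simp [hp x hx hpx]
      · have hxcur : x ∈ cur := by rw [hcur]; exact List.mem_filter.mpr ⟨hx, hpx⟩
        have := pvNoRem_of_fix branch keys p cur hcur hall x hxcur
        simp [this]
    · rw [if_neg hc]
      have hex : ∃ x ∈ cur, ¬ pvKeep cur keys x = true := by
        by_contra hnone
        apply hc
        rw [List.countP_eq_zero]
        intro a ha
        by_cases h : pvKeep cur keys a = true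
        · simp [h]
        · exact absurd ⟨a, ha, h⟩ hnone
      obtain ⟨x0, hx0, hx0k⟩ := hex
      have hlt : (cur.filter (pvKeep cur keys)).length < cur.length := by
        rw [List.length_filter_lt_length_iff_exists]
        exact ⟨x0, hx0, hx0k⟩
      apply ih (cur.filter (pvKeep cur keys)) (fun x => p x && pvKeep cur keys x) (by omega)
      constructor
      · rw [hcur, List.filter_filter]
        exact List.filter_congr (fun x _ => Bool.and_comm _ _)
      · intro x hx hfx
        rw [Bool.and_eq_false_iff] at hfx
        rcases hfx with hfx | hfx
        · exact hp x hx hfx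
        · cases hxp : p x
          · exact hp x hx hxp
          have hxcur : x ∈ cur := by rw [hcur]; exact List.mem_filter.mpr ⟨hx, hxp⟩
          simp only [pvKeep, Bool.or_eq_false_iff, Bool.not_eq_false'] at hfx
          obtain ⟨hnoch, hflag⟩ := hfx
          rw [pvRem_true_iff]
          refine ⟨hflag, ?_⟩
          intro b hb hext
          cases hpb : p b
          · exact hp b hb hpb
          · exfalso
            have hbcur : b ∈ cur := by rw [hcur]; exact List.mem_filter.mpr ⟨hb, hpb⟩
            have : cur.any (fun b => pvExt b x) = true := List.any_eq_true.mpr ⟨b, hbcur, hext⟩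
            rw [hnoch] at this
            exact Bool.false_ne_true this

-- ===== VERDICT (by name: the statement is the Claim_ definition above) =====
theorem remove_wrapping_elements_py_spec : Claim_equal_remove_wrapping_elements_py := by
  intro branch xpaths_map _
  unfold Spec_remove_wrapping_elements_py
  rw [pvB_eq_filter]
  unfold remove_wrapping_elements_py
  exact pvLoopA_eq branch (xpaths_map.map Prod.fst) branch.length branch (fun _ => true)
    (le_refl _) ⟨by simp, by simp⟩
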